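-- pv_equiv track=rewrite | github.com/gapag/horn-binary-deserialization | org/gapag/marskalk/field.py | index_add
-- ===== SOURCE A (Python) =====
-- def index_add(index, span, scopes):
--     index_pos = index[-1]  # position of this field in its context
--     context = scopes[len(index)]  # context of the field; a list of fields
--     if len(context) > index_pos + span:
--         new_index = [x for x in index]
--         new_index[-1] = index_pos + span
--         return new_index
--     else:
--         what_is_left = len(context) - index_pos-1
--         span_left = span - what_is_left
--         return index_add(index[:-1], span_left, scopes)
-- ===== SOURCE B (Python) =====
-- def index_add(index, span, scopes):
--     s = span
--     for k in range(len(index), 0, -1):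
--         pos = index[k - 1]
--         context = scopes[k]
--         if len(context) > pos + s:
--             return index[:k - 1] + [pos + s]
--         s -= len(context) - pos - 1
--     raise IndexError("list index out of range")
-- ===== Notes on version B (the rewrite author's own statement) =====
-- stated objective: alternative
-- what changed: A recurses on index[:-1], copying the whole index list at every carry level; B is a single backward for-loop over positions k = len(index)..1 that only updates a running span and slices the prefix index[:k-1] once at the answer level.
import Mathlib
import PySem

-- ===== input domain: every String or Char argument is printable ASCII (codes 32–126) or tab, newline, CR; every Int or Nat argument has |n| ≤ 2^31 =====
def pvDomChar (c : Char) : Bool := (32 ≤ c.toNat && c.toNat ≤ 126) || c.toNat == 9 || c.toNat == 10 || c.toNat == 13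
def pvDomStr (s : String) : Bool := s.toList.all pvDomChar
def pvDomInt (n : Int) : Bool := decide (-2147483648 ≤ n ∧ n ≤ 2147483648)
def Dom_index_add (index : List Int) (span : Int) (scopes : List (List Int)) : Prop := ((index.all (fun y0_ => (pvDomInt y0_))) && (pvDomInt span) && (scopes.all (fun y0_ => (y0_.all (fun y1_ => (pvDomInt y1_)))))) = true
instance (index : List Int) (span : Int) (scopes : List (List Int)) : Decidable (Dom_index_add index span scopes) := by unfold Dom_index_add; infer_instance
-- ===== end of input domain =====

-- B replaces A's per-level recursion (which copies index[:-1] at every carry step) by a single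
-- backward index scan that slices the prefix once at the answer level (objective: alternative).

-- ===== PORT A =====
-- Literal port of A. Where the Python raises IndexError (index[-1] on an exhausted index, or
-- scopes[len(index)] out of range) the PySem primitive is none and the port returns []; those
-- inputs are excluded by Pre_index_add.
def index_add (index : List Int) (span : Int) (scopes : List (List Int)) : List Int :=
  match h : PySem.List.pyGet? index (-1) with
  | none => []  -- IndexError (excluded by Pre_)
  | some index_pos =>
    match PySem.List.pyGet? scopes (index.length : Int) with
    | none => []  -- IndexError (excluded by Pre_)
    | some context =>
      if (context.length : Int) > index_pos + span then
        -- new_index = [x for x in index]; new_index[-1] = index_pos + span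
        index.dropLast ++ [index_pos + span]
      else
        let what_is_left := (context.length : Int) - index_pos - 1
        let span_left := span - what_is_left
        -- index[:-1] on a nonempty list is exactly dropLast
        index_add index.dropLast span_left scopes
termination_by index.length
decreasing_by
  cases index with
  | nil => simp [PySem.List.pyGet?, PySem.List.pyIdx?] at h
  | cons a as => simp

-- ===== PORT B =====
-- the for-k loop of B, counting k down from len(index) to 1 with running span s
def indexAddScan (index : List Int) (scopes : List (List Int)) (s : Int) (k : Nat) : List Int :=
  match k with
  | 0 => []  -- loop exhausted: B raises IndexError (excluded by Pre_)
  | k' + 1 =>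
    match index[k']?, scopes[k' + 1]? with
    | some pos, some context =>
      if (context.length : Int) > pos + s then
        index.take k' ++ [pos + s]          -- index[:k-1] + [pos + s]
      else
        indexAddScan index scopes (s - ((context.length : Int) - pos - 1)) k'
    | _, _ => []  -- scopes[k] IndexError (excluded by Pre_)

def index_add_alt (index : List Int) (span : Int) (scopes : List (List Int)) : List Int :=
  indexAddScan index scopes span index.length

-- ===== PRECONDITION & SPEC =====
-- the running span when level k+1 .. n have already been carried past (closed form over the input)
def pvSpanAt (index : List Int) (span : Int) (scopes : List (List Int)) (k : Nat) : Int :=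
  span - (((List.range' (k + 1) (index.length - k)).map
    (fun j => ((scopes.getD j []).length : Int) - index.getD (j - 1) 0 - 1)).sum)

-- Pre_ excludes exactly the inputs where Python A raises IndexError: an empty index, a scopes list
-- too short for the first lookup scopes[len(index)], or a carry chain that exhausts index.
def Pre_index_add (index : List Int) (span : Int) (scopes : List (List Int)) : Prop :=
  index ≠ [] ∧ index.length < scopes.length ∧
  ∃ k < index.length,
    ((scopes.getD (k + 1) []).length : Int) > index.getD k 0 + pvSpanAt index span scopes (k + 1)
instance (index : List Int) (span : Int) (scopes : List (List Int)) : Decidable (Pre_index_add index span scopes) := by unfold Pre_index_add; infer_instance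

def pvWitness_index_add : List Int × Int × List (List Int) := ([0], 1, [[], [0, 1]])

def Spec_index_add (index : List Int) (span : Int) (scopes : List (List Int)) (out : List Int) : Prop := out = index_add_alt index span scopes
instance (index : List Int) (span : Int) (scopes : List (List Int)) (out : List Int) : Decidable (Spec_index_add index span scopes out) := by unfold Spec_index_add; infer_instance

-- ===== CLAIM (what is proved, stated in full; the proofs are below) =====
def Claim_equal_index_add : Prop := ∀ (index : List Int) (span : Int) (scopes : List (List Int)), Dom_index_add index span scopes → Pre_index_add index span scopes → Spec_index_add index span scopes (index_add index span scopes)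

-- ===== LEMMAS AND PROOFS =====

-- the scan only looks at positions < k of index, so a trailing element may be dropped
lemma indexAddScan_append (xs : List Int) (x : Int) (scopes : List (List Int)) (s : Int)
    (k : Nat) (hk : k ≤ xs.length) :
    indexAddScan (xs ++ [x]) scopes s k = indexAddScan xs scopes s k := by
  induction k generalizing s with
  | zero => rfl
  | succ k' ih =>
    have hk' : k' < xs.length := hk
    rw [indexAddScan, indexAddScan, List.getElem?_append_left hk',
      List.take_append_of_le_length (Nat.le_of_lt hk')]
    cases xs[k']? with
    | none => rfl
    | some pos =>
      cases scopes[k' + 1]? with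
      | none => rfl
      | some context =>
        simp only []
        split
        · rfl
        · exact ih _ (Nat.le_of_lt hk')

lemma index_add_eq_scan (index : List Int) (span : Int) (scopes : List (List Int)) :
    index_add index span scopes = indexAddScan index scopes span index.length := by
  induction index using List.reverseRecOn generalizing span with
  | nil =>
    rw [index_add]; simp [PySem.List.pyGet?, PySem.List.pyIdx?, indexAddScan]
  | append_singleton xs x ih =>
    rw [index_add]
    have hlast : PySem.List.pyGet? (xs ++ [x]) (-1) = some x := by
      simp [PySem.List.pyGet?, PySem.List.pyIdx?]
    rw [hlast]
    have hlen : (xs ++ [x]).length = xs.length + 1 := by simp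
    rw [hlen, indexAddScan]
    have hidx : (xs ++ [x])[xs.length]? = some x := by simp
    rw [hidx]
    have hsc : PySem.List.pyGet? scopes ((xs.length + 1 : Nat) : Int)
        = scopes[xs.length + 1]? := PySem.List.pyGet?_natCast scopes (xs.length + 1)
    rw [hsc]
    cases scopes[xs.length + 1]? with
    | none => rfl
    | some context =>
      simp only []
      split
      · simp
      · rw [List.dropLast_concat, ih, indexAddScan_append _ _ _ _ _ (Nat.le_refl _)]

-- ===== VERDICT (by name: the statement is the Claim_ definition above) =====
theorem index_add_spec : Claim_equal_index_add := by
  intro index span scopes _ _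
  unfold Spec_index_add index_add_alt
  exact index_add_eq_scan index span scopes
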